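-- pv_equiv track=rewrite | github.com/sunayana-moro/processing | yolo_extract.py | find_sequences
-- ===== SOURCE A (Python) =====
-- def find_sequences(flags, seq_len=5):
--     sequences = []
--     i = 0
--
--     while i <= len(flags) - seq_len:
--         if all(flags[i:i + seq_len]):
--             sequences.append((i, i + seq_len))
--             i += seq_len
--         else:
--             i += 1
--
--     return sequences
-- ===== SOURCE B (Python) =====
-- def find_sequences(flags, seq_len=5):
--     sequences = []
--     count = 0
--     for i, f in enumerate(flags):
--         if f:
--             count += 1
--             if count == seq_len:
--                 sequences.append((i + 1 - seq_len, i + 1))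
--                 count = 0
--         else:
--             count = 0
--     return sequences
-- ===== Notes on version B (the rewrite author's own statement) =====
-- stated objective: faster
-- what changed: Replaced A's sliding-window rescan (re-checking all(flags[i:i+seq_len]) at each position) with a single pass over enumerate(flags) that tracks the length of the current run of truthy flags and records/resets when it reaches seq_len.
-- outside the precondition, e.g. on find_sequences([True], 0): A does not finish within the time limit, B returns []
import Mathlib
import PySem

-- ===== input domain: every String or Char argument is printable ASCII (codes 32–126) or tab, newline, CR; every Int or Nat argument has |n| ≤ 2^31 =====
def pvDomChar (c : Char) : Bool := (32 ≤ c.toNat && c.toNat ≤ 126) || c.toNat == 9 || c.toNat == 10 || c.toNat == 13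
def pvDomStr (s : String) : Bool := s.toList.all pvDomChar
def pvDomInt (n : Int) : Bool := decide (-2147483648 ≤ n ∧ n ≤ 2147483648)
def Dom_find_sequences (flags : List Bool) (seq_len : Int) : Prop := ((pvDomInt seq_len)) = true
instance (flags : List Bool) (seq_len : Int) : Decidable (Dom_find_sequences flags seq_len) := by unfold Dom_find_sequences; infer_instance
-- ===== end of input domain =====

-- B replaces A's O(n·seq_len) sliding-window rescan with a single O(n) pass tracking a consecutive-truthy counter (objective: faster).


-- ===== PORT A =====
-- A's while loop: i advances by seq_len after a hit, by 1 otherwise; fuel flags.length + 1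
-- suffices for every input with seq_len ≥ 1 (= Pre_), where each step increases i by at least 1.
def find_sequences_loop (flags : List Bool) (seq_len : Int) : Nat → Int → List (Int × Int)
  | 0, _ => []
  | fuel + 1, i =>
    if i ≤ PySem.List.len flags - seq_len then
      if (PySem.List.slice flags (some i) (some (i + seq_len))).all id then
        (i, i + seq_len) :: find_sequences_loop flags seq_len fuel (i + seq_len)
      else
        find_sequences_loop flags seq_len fuel (i + 1)
    else []

def find_sequences (flags : List Bool) (seq_len : Int) : List (Int × Int) :=
  find_sequences_loop flags seq_len (flags.length + 1) 0

-- ===== PORT B =====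
-- loop body of Source B's single for-loop over enumerate(flags); state = (sequences, count)
def altStep (seq_len : Int) (st : List (Int × Int) × Int) (x : Int × Bool) : List (Int × Int) × Int :=
  if x.2 then
    if st.2 + 1 = seq_len then (st.1 ++ [(x.1 + 1 - seq_len, x.1 + 1)], 0)
    else (st.1, st.2 + 1)
  else (st.1, 0)

def find_sequences_alt (flags : List Bool) (seq_len : Int) : List (Int × Int) :=
  ((PySem.List.enumerate flags 0).foldl (altStep seq_len) (([] : List (Int × Int)), (0 : Int))).1

-- ===== PRECONDITION & SPEC =====
-- Pre_ excludes seq_len ≤ 0, on which A never returns (the while loop's index stops advancing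
-- and A loops forever); it excludes no input on which A returns.
def Pre_find_sequences (flags : List Bool) (seq_len : Int) : Prop := 1 ≤ seq_len
instance (flags : List Bool) (seq_len : Int) : Decidable (Pre_find_sequences flags seq_len) := by unfold Pre_find_sequences; infer_instance
def pvWitness_find_sequences : List Bool × Int := ([true, true, false, true], 2)
def Spec_find_sequences (flags : List Bool) (seq_len : Int) (out : List (Int × Int)) : Prop := out = find_sequences_alt flags seq_len
instance (flags : List Bool) (seq_len : Int) (out : List (Int × Int)) : Decidable (Spec_find_sequences flags seq_len out) := by unfold Spec_find_sequences; infer_instance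

-- ===== CLAIM (what is proved, stated in full; the proofs are below) =====
def Claim_equal_find_sequences : Prop := ∀ (flags : List Bool) (seq_len : Int), Dom_find_sequences flags seq_len → Pre_find_sequences flags seq_len → Spec_find_sequences flags seq_len (find_sequences flags seq_len)

-- ===== LEMMAS AND PROOFS =====

-- window-greedy reference recursion (window size m+1), structurally = A's scan on a suffix
def Wg (m : Nat) (l : List Bool) (p : Int) : List (Int × Int) :=
  if l.length < m + 1 then []
  else if (l.take (m + 1)).all id then
    (p, p + ((m : Int) + 1)) :: Wg m (l.drop (m + 1)) (p + ((m : Int) + 1))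
  else Wg m l.tail (p + 1)
termination_by l.length
decreasing_by
  · simp_all; omega
  · simp_all [List.length_tail]; omega

-- counter reference recursion, structurally = B's pass; p = index of next element, c = current run
def Cg (m : Nat) : List Bool → Int → Nat → List (Int × Int)
  | [], _, _ => []
  | b :: t, p, c =>
    if b then
      if c + 1 = m + 1 then (p + 1 - ((m : Int) + 1), p + 1) :: Cg m t (p + 1) 0
      else Cg m t (p + 1) (c + 1)
    else Cg m t (p + 1) 0

lemma Cg_short (m : Nat) : ∀ (l : List Bool) (p : Int) (c : Nat), l.length + c < m + 1 → Cg m l p c = [] := by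
  intro l
  induction l with
  | nil => intro p c _; rfl
  | cons b t ih =>
    intro p c h
    simp only [Cg]
    by_cases hb : b
    · simp only [hb, if_true]
      have hne : ¬ (c + 1 = m + 1) := by simp at h; omega
      simp only [hne, if_false]
      exact ih _ _ (by simp at h ⊢; omega)
    · simp only [hb, if_false]
      exact ih _ _ (by simp at h ⊢; omega)

lemma all_take_false (l : List Bool) (j n : Nat) (hj : j < n) (h : l[j]? = some false) :
    (l.take n).all id = false := by
  have hmem : false ∈ l.take n := by
    apply List.mem_of_getElem? (i := j)
    rw [List.getElem?_take_of_lt hj, h]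
  rw [List.all_eq_false]
  exact ⟨false, hmem, by simp⟩

lemma Wg_false_skip (m : Nat) : ∀ (c : Nat), c ≤ m → ∀ (t : List Bool) (p : Int),
    Wg m (List.replicate c true ++ false :: t) p = Wg m (false :: t) (p + c) := by
  intro c
  induction c with
  | zero => intro _ t p; simp
  | succ c ih =>
    intro hc t p
    rw [Wg]
    have hlen : (List.replicate (c + 1) true ++ false :: t).length = c + 2 + t.length := by
      simp; omega
    by_cases hshort : (List.replicate (c + 1) true ++ false :: t).length < m + 1
    · rw [if_pos hshort]
      rw [Wg]
      have : (false :: t).length < m + 1 := by simp at hshort hlen ⊢; omega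
      rw [if_pos this]
    · rw [if_neg hshort]
      have hfalse : ((List.replicate (c + 1) true ++ false :: t).take (m + 1)).all id = false := by
        apply all_take_false _ (c + 1) (m + 1) (by omega)
        rw [List.getElem?_append_right (by simp)]
        simp
      rw [hfalse]
      simp only [Bool.false_eq_true, if_false]
      have htail : (List.replicate (c + 1) true ++ false :: t).tail
          = List.replicate c true ++ false :: t := by
        rw [List.replicate_succ]; rfl
      rw [htail, ih (by omega)]
      congr 1
      push_cast; ring

lemma Wg_eq_Cg (m : Nat) : ∀ (l : List Bool) (c : Nat) (p : Int), c ≤ m →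
    Wg m (List.replicate c true ++ l) p = Cg m l (p + c) c := by
  intro l
  induction l with
  | nil =>
    intro c p hc
    rw [Wg]
    have : (List.replicate c true ++ ([] : List Bool)).length < m + 1 := by simp; omega
    rw [if_pos this]; rfl
  | cons b t ih =>
    intro c p hc
    by_cases hb : b
    · subst hb
      have hsplit : List.replicate c true ++ true :: t = List.replicate (c + 1) true ++ t := by
        rw [List.replicate_succ']; simp
      by_cases hcm : c = m
      · rw [hsplit, hcm, Wg]
        have hlen : ¬ ((List.replicate (m + 1) true ++ t).length < m + 1) := by simp; omega
        rw [if_neg hlen]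
        have htake : ((List.replicate (m + 1) true ++ t).take (m + 1)).all id = true := by
          rw [List.take_append_of_le_length (by simp)]
          simp [List.all_eq_true]
        rw [htake]
        simp only [if_true]
        have hdrop : (List.replicate (m + 1) true ++ t).drop (m + 1) = t := by
          rw [List.drop_append_of_le_length (by simp)]; simp
        rw [hdrop]
        have := ih 0 (p + ((m : Int) + 1)) (by omega)
        simp only [List.replicate_zero, List.nil_append] at this
        rw [this]
        simp only [Cg, if_pos rfl, if_true]
        push_cast
        ring_nf
      · have hc' : c + 1 ≤ m := by omega
        rw [hsplit]
        have := ih (c + 1) p hc'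
        rw [this]
        simp only [Cg, if_true]
        have hne : ¬ (c + 1 = m + 1) := by omega
        rw [if_neg hne]
        congr 1
        push_cast; ring
    · have hb' : b = false := by simp at hb; exact hb
      subst hb'
      rw [Wg_false_skip m c hc t p, Wg]
      by_cases hshort : (false :: t).length < m + 1
      · rw [if_pos hshort]
        simp only [Cg, Bool.false_eq_true, if_false]
        rw [Cg_short m t _ 0 (by simp at hshort ⊢; omega)]
      · rw [if_neg hshort]
        have hfalse : ((false :: t).take (m + 1)).all id = false := by
          apply all_take_false _ 0 (m + 1) (by omega); rfl
        rw [hfalse]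
        simp only [Bool.false_eq_true, if_false, List.tail_cons]
        have := ih 0 (p + c + 1) (by omega)
        simp only [List.replicate_zero, List.nil_append] at this
        rw [this]
        simp only [Cg, Bool.false_eq_true, if_false]
        congr 1
        push_cast; ring

lemma loop_eq_Wg (flags : List Bool) (m : Nat) : ∀ (fuel : Nat) (i : Int), 0 ≤ i →
    (flags.length : Int) ≤ i + fuel →
    find_sequences_loop flags ((m : Int) + 1) fuel i = Wg m (flags.drop i.toNat) i := by
  intro fuel
  induction fuel with
  | zero =>
    intro i hi hlen
    simp only [find_sequences_loop]
    rw [Wg]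
    have : (flags.drop i.toNat).length < m + 1 := by
      simp only [List.length_drop]
      omega
    rw [if_pos this]
  | succ fuel ih =>
    intro i hi hlen
    rw [find_sequences_loop]
    by_cases hcond : i ≤ PySem.List.len flags - ((m : Int) + 1)
    · rw [if_pos hcond]
      rw [PySem.List.len_eq] at hcond
      have hdroplen : ¬ ((flags.drop i.toNat).length < m + 1) := by
        simp only [List.length_drop]; omega
      have hslice : PySem.List.slice flags (some i) (some (i + ((m : Int) + 1)))
          = (flags.drop i.toNat).take (m + 1) := by
        rw [PySem.List.slice_toNat flags hi (by omega)]
        congr 1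
        omega
      rw [hslice]
      rw [Wg, if_neg hdroplen]
      by_cases hall : ((flags.drop i.toNat).take (m + 1)).all id = true
      · rw [if_pos hall, hall]
        simp only [if_true]
        congr 1
        rw [ih (i + ((m : Int) + 1)) (by omega) (by push_cast; omega)]
        congr 1
        rw [List.drop_drop]
        congr 1
        omega
      · rw [if_neg hall]
        simp only [Bool.not_eq_true] at hall
        rw [hall]
        simp only [Bool.false_eq_true, if_false]
        rw [ih (i + 1) (by omega) (by push_cast; omega)]
        congr 1
        rw [List.tail_drop]
        congr 1
        omega
    · rw [if_neg hcond]
      rw [PySem.List.len_eq] at hcond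
      rw [Wg]
      have : (flags.drop i.toNat).length < m + 1 := by
        simp only [List.length_drop]; omega
      rw [if_pos this]

lemma fold_eq_Cg (m : Nat) : ∀ (l : List Bool) (s : Int) (acc : List (Int × Int)) (c : Nat), c ≤ m →
    ((PySem.List.enumerate l s).foldl (altStep ((m : Int) + 1)) (acc, (c : Int))).1
      = acc ++ Cg m l s c := by
  intro l
  induction l with
  | nil => intro s acc c _; simp [PySem.List.enumerate_nil, Cg]
  | cons b t ih =>
    intro s acc c hc
    rw [PySem.List.enumerate_cons]
    simp only [List.foldl_cons]
    by_cases hb : b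
    · subst hb
      by_cases hcm : c = m
      · rw [hcm]
        have hstep : altStep ((m : Int) + 1) (acc, (m : Int)) (s, true)
            = (acc ++ [(s + 1 - ((m : Int) + 1), s + 1)], (0 : Int)) := by
          simp [altStep]
        rw [hstep]
        have := ih (s + 1) (acc ++ [(s + 1 - ((m : Int) + 1), s + 1)]) 0 (by omega)
        simp only [Nat.cast_zero] at this
        rw [this]
        simp only [Cg, if_pos rfl, if_true, List.append_assoc, List.singleton_append]
      · have hstep : altStep ((m : Int) + 1) (acc, (c : Int)) (s, true)
            = (acc, ((c : Int) + 1)) := by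
          simp only [altStep, if_true]
          have : ¬ ((c : Int) + 1 = (m : Int) + 1) := by
            intro h; apply hcm; omega
          simp [this]
        rw [hstep]
        have hcast : ((c : Int) + 1) = (((c + 1 : Nat)) : Int) := by push_cast; ring
        rw [hcast, ih (s + 1) acc (c + 1) (by omega)]
        simp only [Cg, if_true]
        have hne : ¬ (c + 1 = m + 1) := by omega
        rw [if_neg hne]
    · have hb' : b = false := by simp at hb; exact hb
      subst hb'
      have hstep : altStep ((m : Int) + 1) (acc, (c : Int)) (s, false) = (acc, (0 : Int)) := by
        simp [altStep]
      rw [hstep]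
      have := ih (s + 1) acc 0 (by omega)
      simp only [Nat.cast_zero] at this
      rw [this]
      simp only [Cg, Bool.false_eq_true, if_false]

-- ===== VERDICT (by name: the statement is the Claim_ definition above) =====
theorem find_sequences_spec : Claim_equal_find_sequences := by
  intro flags seq_len _ hpre
  unfold Spec_find_sequences
  have hpre' : 1 ≤ seq_len := hpre
  obtain ⟨m, hseq⟩ : ∃ m : Nat, seq_len = (m : Int) + 1 := ⟨(seq_len - 1).toNat, by omega⟩
  have hA : find_sequences flags seq_len = Cg m flags 0 0 := by
    rw [find_sequences, hseq, loop_eq_Wg flags m (flags.length + 1) 0 (by omega) (by push_cast; omega)]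
    have := Wg_eq_Cg m flags 0 0 (by omega)
    simp only [List.replicate_zero, List.nil_append, Nat.cast_zero, add_zero] at this
    simpa using this
  have hB : find_sequences_alt flags seq_len = Cg m flags 0 0 := by
    rw [find_sequences_alt, hseq]
    have := fold_eq_Cg m flags 0 [] 0 (by omega)
    simp only [Nat.cast_zero, List.nil_append] at this
    rw [this]
  rw [hA, hB]
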